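-- pv_equiv track=rewrite | github.com/dudberoll/system-analysis-dudnik-21-2 | task2/task.py | calculate_r4
-- ===== SOURCE A (Python) =====
-- def calculate_r4(edges, n):
--     # Создаем словарь для хранения родителей
--     parents = {i: None for i in range(1, n + 1)}
--
--     # Заполняем родителей из списка рёбер
--     for parent, child in edges:
--         parents[child] = parent
--
--     # Вычисляем r4 - количество дедов для каждого узла
--     r4 = [0] * n
--     for node in range(1, n + 1):
--         grandparent = parents.get(parents[node], None)  # Находим родителя родителя (деда)
--         if grandparent is not None:
--             r4[node - 1] = 1  # Если у узла есть дед, ставим 1, иначе 0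
--
--     return r4
-- ===== SOURCE B (Python) =====
-- def calculate_r4(edges, n):
--     # Last-write-wins parent map, then push marks forward: every child of a
--     # node that itself has a parent gets a grandparent mark.
--     parent = {}
--     for p, c in edges:
--         parent[c] = p
--     children = {}
--     for c in range(1, n + 1):
--         p = parent.get(c)
--         if p is not None:
--             children[p] = children.get(p, []) + [c]
--     r4 = [0] * n
--     for p in parent:
--         for c in children.get(p, []):
--             r4[c - 1] = 1
--     return r4
-- ===== Notes on version B (the rewrite author's own statement) =====
-- stated objective: alternative
-- what changed: Instead of each node pulling its grandparent via two chained dict lookups per node, B inverts the resolved parent map into a children adjacency and pushes marks forward from every node that itself has a parent onto its children.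
import Mathlib
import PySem

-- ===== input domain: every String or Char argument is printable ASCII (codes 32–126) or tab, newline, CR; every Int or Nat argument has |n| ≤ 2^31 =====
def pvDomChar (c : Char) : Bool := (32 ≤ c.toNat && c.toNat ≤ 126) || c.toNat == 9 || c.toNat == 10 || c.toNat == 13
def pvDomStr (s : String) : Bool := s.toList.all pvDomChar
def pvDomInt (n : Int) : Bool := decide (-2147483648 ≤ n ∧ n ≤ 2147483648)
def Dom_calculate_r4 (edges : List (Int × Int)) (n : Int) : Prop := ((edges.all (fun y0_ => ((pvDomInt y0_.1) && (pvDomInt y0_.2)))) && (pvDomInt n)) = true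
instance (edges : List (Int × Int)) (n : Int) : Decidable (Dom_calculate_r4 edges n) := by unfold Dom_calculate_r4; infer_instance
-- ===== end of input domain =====

-- B inverts the resolved parent map into a children adjacency and pushes the
-- grandparent marks forward from each node that itself has a parent (objective: alternative).

-- ===== PORT A =====
-- A-side helpers: the two dict-building statements of A.
-- parents = {i: None for i in range(1, n + 1)}
def initParentsA (n : Int) : PySem.Dict (Option Int) (Option Int) :=
  (PySem.List.pyRange 1 (n + 1) 1).foldl (fun d i => d.insert (some i) none) PySem.Dict.empty

-- for parent, child in edges: parents[child] = parent
def parentsA (edges : List (Int × Int)) (n : Int) : PySem.Dict (Option Int) (Option Int) :=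
  edges.foldl (fun d e => d.insert (some e.2) (some e.1)) (initParentsA n)

-- The dict has key type Option Int (Python looks up parents.get(parents[node], None)
-- where parents[node] may be None) and value type Option Int (None or an int).
-- parents[node] is written as getD with default none: exact here, since every
-- node in range(1, n + 1) is a key of parents (KeyError is impossible).
def calculate_r4 (edges : List (Int × Int)) (n : Int) : List Int :=
  let parents := parentsA edges n
  let r4 : List Int := List.replicate n.toNat 0
  (PySem.List.pyRange 1 (n + 1) 1).foldl (fun r4 node =>
      let grandparent := parents.getD (parents.getD (some node) none) none
      if grandparent.isSome then PySem.List.pySetD r4 (node - 1) 1 else r4) r4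

-- ===== PORT B =====
-- B-side helpers: B's two dict-building loops.
def parentB (edges : List (Int × Int)) : PySem.Dict Int Int :=
  edges.foldl (fun d e => d.insert e.2 e.1) PySem.Dict.empty

def childrenB (edges : List (Int × Int)) (n : Int) : PySem.Dict Int (List Int) :=
  (PySem.List.pyRange 1 (n + 1) 1).foldl (fun d c =>
      match (parentB edges).get? c with
      | some p => d.insert p (d.getD p [] ++ [c])
      | none => d) PySem.Dict.empty

def calculate_r4_alt (edges : List (Int × Int)) (n : Int) : List Int :=
  let r4 : List Int := List.replicate n.toNat 0
  (parentB edges).keys.foldl (fun r4 p =>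
      ((childrenB edges n).getD p []).foldl (fun r4 c => PySem.List.pySetD r4 (c - 1) 1) r4) r4

-- ===== PRECONDITION & SPEC =====
def Spec_calculate_r4 (edges : List (Int × Int)) (n : Int) (out : List Int) : Prop := out = calculate_r4_alt edges n
instance (edges : List (Int × Int)) (n : Int) (out : List Int) : Decidable (Spec_calculate_r4 edges n out) := by unfold Spec_calculate_r4; infer_instance

-- ===== CLAIM (what is proved, stated in full; the proofs are below) =====
def Claim_equal_calculate_r4 : Prop := ∀ (edges : List (Int × Int)) (n : Int), Dom_calculate_r4 edges n → Spec_calculate_r4 edges n (calculate_r4 edges n)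

-- ===== LEMMAS AND PROOFS =====

-- The last parent assigned to x by the edge loop (last write wins); none if x is no edge's child.
def lastPar (edges : List (Int × Int)) (x : Int) : Option Int :=
  (edges.reverse.find? (fun e => e.2 == x)).map (·.1)

-- "node has a grandparent": its last parent exists and is itself some edge's child.
def hasGp (edges : List (Int × Int)) (x : Int) : Bool :=
  ((lastPar edges x).bind (lastPar edges)).isSome

theorem lastPar_isSome_iff (edges : List (Int × Int)) (x : Int) :
    (lastPar edges x).isSome = true ↔ x ∈ edges.map (·.2) := by
  simp [lastPar, List.find?_isSome]

-- a fold of inserts realises last-write-wins lookup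
theorem get?_foldl_insert_last {κ ν α : Type} [BEq κ] [LawfulBEq κ] [DecidableEq κ]
    (l : List α) (key : α → κ) (val : α → ν) (d : PySem.Dict κ ν) (x : κ) :
    (l.foldl (fun d a => d.insert (key a) (val a)) d).get? x
      = match l.reverse.find? (fun a => key a == x) with
        | some a => some (val a)
        | none => d.get? x := by
  induction l generalizing d with
  | nil => simp
  | cons a t ih =>
      simp only [List.foldl_cons, List.reverse_cons, List.find?_append]
      rw [ih]
      cases h : t.reverse.find? (fun a => key a == x) with
      | some b => simp
      | none =>
          by_cases hx : key a = x
          · simp [hx, PySem.Dict.get?_insert_self]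
          · have hb : (key a == x) = false := by simp [hx]
            simp [hb, PySem.Dict.get?_insert]
            intro hxa
            exact absurd hxa.symm hx

-- the range-built dict only ever holds value none
theorem getD_initParentsA_aux (l : List Int) (d : PySem.Dict (Option Int) (Option Int))
    (k : Option Int) (h : d.getD k none = none) :
    ((l.foldl (fun d i => d.insert (some i) none) d).getD k none) = none := by
  induction l generalizing d with
  | nil => exact h
  | cons i t ih =>
      refine ih _ ?_
      rw [PySem.Dict.getD_insert]
      split
      · rfl
      · exact h

theorem getD_initParentsA (n : Int) (k : Option Int) :
    (initParentsA n).getD k none = none := by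
  exact getD_initParentsA_aux _ _ _ (by simp)

theorem parentsA_getD_some (edges : List (Int × Int)) (n : Int) (x : Int) :
    (parentsA edges n).getD (some x) none = lastPar edges x := by
  unfold parentsA
  rw [PySem.Dict.getD_eq_get?_getD,
    get?_foldl_insert_last edges (fun e => (some e.2 : Option Int)) (fun e => (some e.1 : Option Int)) _ (some x)]
  have hpred : (fun e : Int × Int => ((some e.2 : Option Int) == some x)) = (fun e => (e.2 == x)) := by
    funext e; simp
  rw [hpred]
  cases hf : edges.reverse.find? (fun e => e.2 == x) with
  | some e => simp [lastPar, hf]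
  | none =>
      have hb := getD_initParentsA n (some x)
      rw [PySem.Dict.getD_eq_get?_getD] at hb
      simp [lastPar, hf, hb]

theorem parentsA_getD_none (edges : List (Int × Int)) (n : Int) :
    (parentsA edges n).getD none none = none := by
  unfold parentsA
  rw [PySem.Dict.getD_eq_get?_getD,
    get?_foldl_insert_last edges (fun e => (some e.2 : Option Int)) (fun e => (some e.1 : Option Int)) _ none]
  cases hf : edges.reverse.find? (fun e : Int × Int => (some e.2 : Option Int) == none) with
  | some e =>
      have := List.find?_some hf
      simp at this
  | none =>
      have hb := getD_initParentsA n none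
      rw [PySem.Dict.getD_eq_get?_getD] at hb
      simp [hb]

theorem parentB_get? (edges : List (Int × Int)) (x : Int) :
    (parentB edges).get? x = lastPar edges x := by
  unfold parentB
  rw [get?_foldl_insert_last edges (·.2) (·.1) _ x]
  cases hf : edges.reverse.find? (fun e => e.2 == x) with
  | some e => simp [lastPar, hf]
  | none => simp [lastPar, hf]

theorem parentB_keys_mem (edges : List (Int × Int)) (x : Int) :
    x ∈ (parentB edges).keys ↔ (lastPar edges x).isSome = true := by
  unfold parentB
  rw [PySem.Dict.keys_foldl_insert_key]
  simp [PySem.Set.mem_update, lastPar_isSome_iff]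

-- the children-building loop groups each c under its key g c, in order
theorem getD_childfold (g : Int → Option Int) (l : List Int)
    (d : PySem.Dict Int (List Int)) (p : Int) :
    (l.foldl (fun d c =>
        match g c with
        | some q => d.insert q (d.getD q [] ++ [c])
        | none => d) d).getD p []
      = d.getD p [] ++ l.filter (fun c => g c == some p) := by
  induction l generalizing d with
  | nil => simp
  | cons c t ih =>
      simp only [List.foldl_cons, List.filter_cons]
      cases hg : g c with
      | none => simp [ih]
      | some q =>
          rw [ih]
          by_cases hpq : p = q
          · subst hpq
            rw [PySem.Dict.getD_insert_self]
            simp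
          · rw [PySem.Dict.getD_insert]
            simp [hpq, Ne.symm hpq]

theorem childrenB_getD (edges : List (Int × Int)) (n : Int) (p : Int) :
    (childrenB edges n).getD p []
      = (PySem.List.pyRange 1 (n + 1) 1).filter (fun c => lastPar edges c == some p) := by
  unfold childrenB
  have hc : (PySem.List.pyRange 1 (n + 1) 1).foldl (fun d c =>
        match (parentB edges).get? c with
        | some p => d.insert p (d.getD p [] ++ [c])
        | none => d) PySem.Dict.empty
      = (PySem.List.pyRange 1 (n + 1) 1).foldl (fun d c =>
        match lastPar edges c with
        | some p => d.insert p (d.getD p [] ++ [c])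
        | none => d) PySem.Dict.empty := by
    refine PySem.List.foldl_congr_mem _ _ _ _ ?_
    intro d c _
    rw [parentB_get?]
  rw [hc, getD_childfold]
  simp

-- a nested marking loop is a flat marking loop
theorem foldl_foldl_eq_flatMap {α β : Type} (ks : List α) (h : α → List β)
    (step : List Int → β → List Int) (r : List Int) :
    ks.foldl (fun r p => (h p).foldl step r) r = (ks.flatMap h).foldl step r := by
  induction ks generalizing r with
  | nil => simp
  | cons k t ih => simp [List.foldl_append, ih]

-- characterisation of a conditional index-marking fold
theorem foldl_ifset_getElem? (l : List Int) (p : Int → Bool) (r : List Int) (k : Nat) :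
    (l.foldl (fun r x => if p x then r.set (x - 1).toNat 1 else r) r)[k]?
      = if (∃ x ∈ l, p x = true ∧ (x - 1).toNat = k) ∧ k < r.length then some 1 else r[k]? := by
  induction l generalizing r with
  | nil => simp
  | cons x t ih =>
      simp only [List.foldl_cons]
      by_cases hp : p x
      · rw [if_pos hp, ih, List.length_set]
        rw [List.getElem?_set]
        by_cases hk : k < r.length
        · by_cases hxk : (x - 1).toNat = k
          · have h1 : ((∃ y ∈ x :: t, p y = true ∧ (y - 1).toNat = k) ∧ k < r.length) := ⟨⟨x, by simp, hp, hxk⟩, hk⟩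
            rw [if_pos h1]
            split
            · rfl
            · simp [hxk, hk]
          · have h2 : ((∃ y ∈ t, p y = true ∧ (y - 1).toNat = k) ∧ k < r.length)
                ↔ ((∃ y ∈ x :: t, p y = true ∧ (y - 1).toNat = k) ∧ k < r.length) := by
              constructor
              · rintro ⟨⟨y, hy, hpy, hyk⟩, hk'⟩
                exact ⟨⟨y, by simp [hy], hpy, hyk⟩, hk'⟩
              · rintro ⟨⟨y, hy, hpy, hyk⟩, hk'⟩
                rcases List.mem_cons.mp hy with rfl | hy'
                · exact absurd hyk hxk
                · exact ⟨⟨y, hy', hpy, hyk⟩, hk'⟩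
            rw [if_congr h2 rfl rfl, if_neg hxk]
        · have hno : ∀ (s : List Int), ¬ ((∃ y ∈ s, p y = true ∧ (y - 1).toNat = k) ∧ k < r.length) :=
            fun s h => hk h.2
          rw [if_neg (hno t), if_neg (hno (x :: t))]
          split
          · simp [hk]
            omega
          · rfl
      · rw [if_neg hp, ih]
        have h2 : ((∃ y ∈ t, p y = true ∧ (y - 1).toNat = k) ∧ k < r.length)
            ↔ ((∃ y ∈ x :: t, p y = true ∧ (y - 1).toNat = k) ∧ k < r.length) := by
          constructor
          · rintro ⟨⟨y, hy, hpy, hyk⟩, hk'⟩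
            exact ⟨⟨y, by simp [hy], hpy, hyk⟩, hk'⟩
          · rintro ⟨⟨y, hy, hpy, hyk⟩, hk'⟩
            rcases List.mem_cons.mp hy with rfl | hy'
            · exact absurd hpy (by simp [hp])
            · exact ⟨⟨y, hy', hpy, hyk⟩, hk'⟩
        rw [if_congr h2 rfl rfl]

-- the unconditional variant (B's inner marking loop)
theorem foldl_set_getElem? (l : List Int) (r : List Int) (k : Nat) :
    (l.foldl (fun r x => r.set (x - 1).toNat 1) r)[k]?
      = if (∃ x ∈ l, (x - 1).toNat = k) ∧ k < r.length then some 1 else r[k]? := by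
  have h := foldl_ifset_getElem? l (fun _ => true) r k
  simp only [true_and] at h ⊢
  rw [← h]
  rfl

-- both sides mark index k exactly when node k+1 has a grandparent
theorem calcA_getElem? (edges : List (Int × Int)) (n : Int) (k : Nat) :
    (calculate_r4 edges n)[k]?
      = if (k < n.toNat ∧ hasGp edges ((k : Int) + 1) = true)
        then some 1 else (List.replicate n.toNat (0 : Int))[k]? := by
  simp only [calculate_r4]
  have hcongr : ∀ (acc : List Int), ∀ node ∈ PySem.List.pyRange 1 (n + 1) 1,
      (if ((parentsA edges n).getD ((parentsA edges n).getD (some node) none) none).isSome = true then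
        PySem.List.pySetD acc (node - 1) 1 else acc)
      = (if hasGp edges node then acc.set (node - 1).toNat 1 else acc) := by
    intro r node hnode
    rw [PySem.List.mem_pyRange_one] at hnode
    rw [parentsA_getD_some]
    cases hl : lastPar edges node with
    | none => simp [parentsA_getD_none, hasGp, hl]
    | some q =>
        rw [parentsA_getD_some]
        have hgp : hasGp edges node = (lastPar edges q).isSome := by simp [hasGp, hl]
        rw [hgp]
        split
        · rw [PySem.List.pySetD_of_nonneg _ _ (by omega)]
        · rfl
  rw [PySem.List.foldl_congr_mem _ _
      (fun acc node => if hasGp edges node then acc.set (node - 1).toNat 1 else acc) _ hcongr]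
  rw [foldl_ifset_getElem? _ (hasGp edges)]
  have hiff : ((∃ x ∈ PySem.List.pyRange 1 (n + 1) 1, hasGp edges x = true ∧ (x - 1).toNat = k)
        ∧ k < (List.replicate n.toNat (0 : Int)).length)
      ↔ (k < n.toNat ∧ hasGp edges ((k : Int) + 1) = true) := by
    rw [List.length_replicate]
    constructor
    · rintro ⟨⟨x, hx, hgp, hxk⟩, hk⟩
      rw [PySem.List.mem_pyRange_one] at hx
      have hxe : x = (k : Int) + 1 := by omega
      subst hxe
      exact ⟨hk, hgp⟩
    · rintro ⟨hk, hgp⟩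
      refine ⟨⟨(k : Int) + 1, ?_, hgp, by omega⟩, hk⟩
      rw [PySem.List.mem_pyRange_one]
      omega
  rw [if_congr hiff rfl rfl]

theorem calcB_getElem? (edges : List (Int × Int)) (n : Int) (k : Nat) :
    (calculate_r4_alt edges n)[k]?
      = if (k < n.toNat ∧ hasGp edges ((k : Int) + 1) = true)
        then some 1 else (List.replicate n.toNat (0 : Int))[k]? := by
  simp only [calculate_r4_alt]
  rw [foldl_foldl_eq_flatMap]
  have hmem : ∀ c ∈ (parentB edges).keys.flatMap (fun p => (childrenB edges n).getD p []),
      1 ≤ c ∧ c < n + 1 ∧ ∃ p, (lastPar edges p).isSome = true ∧ lastPar edges c = some p := by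
    intro c hc
    rw [List.mem_flatMap] at hc
    obtain ⟨p, hp, hcp⟩ := hc
    rw [childrenB_getD, List.mem_filter] at hcp
    obtain ⟨hcr, hcl⟩ := hcp
    rw [PySem.List.mem_pyRange_one] at hcr
    exact ⟨hcr.1, hcr.2, p, (parentB_keys_mem edges p).mp hp, by simpa using hcl⟩
  have hcongr : ∀ (acc : List Int),
      ∀ c ∈ (parentB edges).keys.flatMap (fun p => (childrenB edges n).getD p []),
      PySem.List.pySetD acc (c - 1) 1 = acc.set (c - 1).toNat 1 := by
    intro r c hc
    have := (hmem c hc).1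
    rw [PySem.List.pySetD_of_nonneg _ _ (by omega)]
  rw [PySem.List.foldl_congr_mem _ _ (fun acc c => acc.set (c - 1).toNat 1) _ hcongr]
  rw [foldl_set_getElem?]
  have hiff : ((∃ c ∈ (parentB edges).keys.flatMap (fun p => (childrenB edges n).getD p []),
        (c - 1).toNat = k) ∧ k < (List.replicate n.toNat (0 : Int)).length)
      ↔ (k < n.toNat ∧ hasGp edges ((k : Int) + 1) = true) := by
    rw [List.length_replicate]
    constructor
    · rintro ⟨⟨c, hc, hck⟩, hk⟩
      obtain ⟨hc1, _, p, hps, hcp⟩ := hmem c hc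
      have hce : c = (k : Int) + 1 := by omega
      subst hce
      refine ⟨hk, ?_⟩
      simp [hasGp, hcp, Option.isSome_iff_exists] at hps ⊢
      exact hps
    · rintro ⟨hk, hgp⟩
      cases hl : lastPar edges ((k : Int) + 1) with
      | none => simp [hasGp, hl] at hgp
      | some p =>
          have hps : (lastPar edges p).isSome = true := by
            simpa [hasGp, hl] using hgp
          refine ⟨⟨(k : Int) + 1, ?_, by omega⟩, hk⟩
          rw [List.mem_flatMap]
          refine ⟨p, (parentB_keys_mem edges p).mpr hps, ?_⟩
          rw [childrenB_getD, List.mem_filter, PySem.List.mem_pyRange_one]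
          constructor
          · omega
          · simp [hl]
  rw [if_congr hiff rfl rfl]

theorem calc_eq (edges : List (Int × Int)) (n : Int) :
    calculate_r4 edges n = calculate_r4_alt edges n := by
  apply List.ext_getElem?
  intro k
  rw [calcA_getElem?, calcB_getElem?]

-- ===== VERDICT (by name: the statement is the Claim_ definition above) =====
theorem calculate_r4_spec : Claim_equal_calculate_r4 := by
  intro edges n _
  unfold Spec_calculate_r4
  exact calc_eq edges n
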